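-- pv_equiv track=rewrite | github.com/football-investment/practice-booking-system | archive/streamlit_app/api_helpers_enrollments.py | get_enrollments_by_type
-- ===== SOURCE A (Python) =====
-- from typing import Tuple, Optional, Dict, List
--
-- def get_enrollments_by_type(enrollments: List[Dict]) -> Dict[str, List[Dict]]:
--     """
--     Helper function to group enrollments by enrollment type.
--
--     Args:
--         enrollments: List of enrollment dictionaries from get_user_schedule
--
--     Returns:
--         {
--             "TOURNAMENT": [...],
--             "MINI_SEASON": [...],
--             "ACADEMY_SEASON": [...]
--         }
--     """
--     grouped = {
--         "TOURNAMENT": [],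
--         "MINI_SEASON": [],
--         "ACADEMY_SEASON": []
--     }
--
--     for enrollment in enrollments:
--         enrollment_type = enrollment.get("enrollment_type", "OTHER")
--         if enrollment_type in grouped:
--             grouped[enrollment_type].append(enrollment)
--
--     return grouped
-- ===== SOURCE B (Python) =====
-- def get_enrollments_by_type(enrollments):
--     return {
--         "TOURNAMENT": [e for e in enrollments if e.get("enrollment_type") == "TOURNAMENT"],
--         "MINI_SEASON": [e for e in enrollments if e.get("enrollment_type") == "MINI_SEASON"],
--         "ACADEMY_SEASON": [e for e in enrollments if e.get("enrollment_type") == "ACADEMY_SEASON"],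
--     }
-- ===== Notes on version B (the rewrite author's own statement) =====
-- stated objective: idiomatic
-- what changed: Replaced the single mutate-a-dict dispatch loop with a dict literal of three independent list comprehensions, one filter pass per enrollment type.
import Mathlib
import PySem

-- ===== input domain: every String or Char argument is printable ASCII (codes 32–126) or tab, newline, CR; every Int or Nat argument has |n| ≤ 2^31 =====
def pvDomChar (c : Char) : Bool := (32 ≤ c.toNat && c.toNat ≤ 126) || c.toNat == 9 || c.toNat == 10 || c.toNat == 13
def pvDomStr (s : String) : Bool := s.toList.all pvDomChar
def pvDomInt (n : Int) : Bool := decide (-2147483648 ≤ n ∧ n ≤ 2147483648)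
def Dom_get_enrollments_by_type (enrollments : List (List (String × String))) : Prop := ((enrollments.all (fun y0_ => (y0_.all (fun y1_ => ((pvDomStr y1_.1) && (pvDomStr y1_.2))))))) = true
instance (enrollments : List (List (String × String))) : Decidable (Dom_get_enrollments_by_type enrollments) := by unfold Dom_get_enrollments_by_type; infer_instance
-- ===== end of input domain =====

-- B replaces A's single bucketing loop over a mutable dict with a dict literal of
-- three independent filter comprehensions, one per enrollment type (idiomatic; same cost class).


-- ===== PORT A =====
-- grouped = {"TOURNAMENT": [], "MINI_SEASON": [], "ACADEMY_SEASON": []}; loop dispatches each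
-- enrollment into grouped by its type (default "OTHER"), skipping unknown types; returns grouped.
def get_enrollments_by_type (enrollments : List (List (String × String))) : List (String × List (List (String × String))) :=
  let grouped : PySem.Dict String (List (List (String × String))) :=
    ((PySem.Dict.empty.insert "TOURNAMENT" []).insert "MINI_SEASON" []).insert "ACADEMY_SEASON" []
  let grouped := enrollments.foldl (fun g e =>
      let t := (PySem.Dict.mk e).getD "enrollment_type" "OTHER"
      if g.contains t then g.modify t [] (· ++ [e]) else g) grouped
  grouped.items

-- ===== PORT B =====
-- dict literal of three filter comprehensions, keyed by e.get("enrollment_type") == <type>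
def get_enrollments_by_type_alt (enrollments : List (List (String × String))) : List (String × List (List (String × String))) :=
  [("TOURNAMENT",     enrollments.filter (fun e => (PySem.Dict.mk e).get? "enrollment_type" == some "TOURNAMENT")),
   ("MINI_SEASON",    enrollments.filter (fun e => (PySem.Dict.mk e).get? "enrollment_type" == some "MINI_SEASON")),
   ("ACADEMY_SEASON", enrollments.filter (fun e => (PySem.Dict.mk e).get? "enrollment_type" == some "ACADEMY_SEASON"))]

-- ===== PRECONDITION & SPEC =====
def Spec_get_enrollments_by_type (enrollments : List (List (String × String))) (out : List (String × List (List (String × String)))) : Prop := out = get_enrollments_by_type_alt enrollments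
instance (enrollments : List (List (String × String))) (out : List (String × List (List (String × String)))) : Decidable (Spec_get_enrollments_by_type enrollments out) := by unfold Spec_get_enrollments_by_type; infer_instance

-- ===== CLAIM (what is proved, stated in full; the proofs are below) =====
def Claim_equal_get_enrollments_by_type : Prop := ∀ (enrollments : List (List (String × String))), Dom_get_enrollments_by_type enrollments → Spec_get_enrollments_by_type enrollments (get_enrollments_by_type enrollments)

-- ===== LEMMAS AND PROOFS =====

-- A's loop body and initial dict, named for the lemmas
def pvStep (g : PySem.Dict String (List (List (String × String)))) (e : List (String × String)) :
    PySem.Dict String (List (List (String × String))) :=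
  if g.contains ((PySem.Dict.mk e).getD "enrollment_type" "OTHER") then
    g.modify ((PySem.Dict.mk e).getD "enrollment_type" "OTHER") [] (· ++ [e])
  else g

def pvInit : PySem.Dict String (List (List (String × String))) :=
  ((PySem.Dict.empty.insert "TOURNAMENT" []).insert "MINI_SEASON" []).insert "ACADEMY_SEASON" []

lemma pvStep_keys (g : PySem.Dict String (List (List (String × String)))) (e : List (String × String)) :
    (pvStep g e).keys = g.keys := by
  unfold pvStep
  split
  · next h => rw [PySem.Dict.keys_modify, PySem.Dict.keys_insert_of_contains _ _ (by simpa using h)]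
  · rfl

lemma pv_loop_keys (l : List (List (String × String)))
    (g : PySem.Dict String (List (List (String × String)))) :
    (l.foldl pvStep g).keys = g.keys := by
  induction l generalizing g with
  | nil => rfl
  | cons e l ih => simp [List.foldl_cons, ih, pvStep_keys]

lemma pv_loop_getD (l : List (List (String × String)))
    (g : PySem.Dict String (List (List (String × String)))) (c : String)
    (hc : g.contains c = true) :
    (l.foldl pvStep g).getD c [] =
      g.getD c [] ++ (l.filter
        (fun e => (PySem.Dict.mk e).getD "enrollment_type" "OTHER" == c)) := by
  induction l generalizing g with
  | nil => simp
  | cons e l ih =>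
    simp only [List.foldl_cons, List.filter_cons]
    have hck : (pvStep g e).contains c = true := by
      unfold pvStep; split
      · rw [PySem.Dict.contains_modify]; simp [hc]
      · exact hc
    rw [ih _ hck]
    by_cases ht : (PySem.Dict.mk e).getD "enrollment_type" "OTHER" = c
    · simp only [ht, beq_self_eq_true, if_pos]
      unfold pvStep
      rw [ht, if_pos hc, PySem.Dict.getD_modify_self]
      simp
    · have : ((PySem.Dict.mk e).getD "enrollment_type" "OTHER" == c) = false := by
        simpa using ht
      simp only [this, Bool.false_eq_true, if_neg, not_false_iff]
      congr 1
      unfold pvStep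
      split
      · exact PySem.Dict.getD_modify_of_ne _ _ _ (Ne.symm ht)
      · rfl

-- for the three real type names, getD with default "OTHER" hitting c is exactly get? = some c
lemma pv_filter_pred (l : List (List (String × String))) (c : String) (hc : c ≠ "OTHER") :
    l.filter (fun e => (PySem.Dict.mk e).getD "enrollment_type" "OTHER" == c) =
    l.filter (fun e => (PySem.Dict.mk e).get? "enrollment_type" == some c) := by
  apply List.filter_congr
  intro e _
  rw [PySem.Dict.getD_eq_get?_getD]
  cases h : (PySem.Dict.mk e).get? "enrollment_type" with
  | none => simpa using fun h' => (hc h'.symm).elim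
  | some t => simp

lemma pv_main (enrollments : List (List (String × String))) :
    get_enrollments_by_type enrollments = get_enrollments_by_type_alt enrollments := by
  show (enrollments.foldl pvStep pvInit).items = _
  have hkeys : (enrollments.foldl pvStep pvInit).keys = ["TOURNAMENT", "MINI_SEASON", "ACADEMY_SEASON"] := by
    rw [pv_loop_keys]; decide
  have hnd : (enrollments.foldl pvStep pvInit).keys.Nodup := by rw [hkeys]; decide
  rw [PySem.Dict.items_eq_map_keys _ hnd [], hkeys]
  have h := fun c hc => pv_loop_getD enrollments pvInit c hc
  simp only [List.map_cons, List.map_nil]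
  rw [h "TOURNAMENT" (by decide), h "MINI_SEASON" (by decide), h "ACADEMY_SEASON" (by decide),
    pv_filter_pred _ _ (by decide), pv_filter_pred _ _ (by decide), pv_filter_pred _ _ (by decide)]
  show _ = get_enrollments_by_type_alt enrollments
  unfold get_enrollments_by_type_alt
  congr 1

-- ===== VERDICT (by name: the statement is the Claim_ definition above) =====
theorem get_enrollments_by_type_spec : Claim_equal_get_enrollments_by_type := by
  intro enrollments _
  unfold Spec_get_enrollments_by_type
  exact pv_main enrollments
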